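-- pv_equiv track=rewrite | github.com/albad12/pne-studentslab | S03/dna_count.py | dna_bases_iterator
-- ===== SOURCE A (Python) =====
-- def dna_bases_iterator(seq):
--     seq = seq.upper()
--     length = len(seq)
--     a = 0
--     t = 0
--     c = 0
--     g = 0
--     for base in seq:
--         if base == "A":
--             a += 1
--         elif base == "T":
--             t += 1
--         elif base == "C":
--             c += 1
--         elif base == "G":
--             g += 1
--     return length, a, t, g, c
-- ===== SOURCE B (Python) =====
-- def dna_bases_iterator(seq):
--     seq = seq.upper()
--     return len(seq), seq.count("A"), seq.count("T"), seq.count("G"), seq.count("C")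
-- ===== Notes on version B (the rewrite author's own statement) =====
-- stated objective: idiomatic
-- what changed: Replaces the single pass with an if/elif chain and four manual counters by four independent str.count scans over the uppercased sequence, eliminating the loop and branch structure entirely.
import Mathlib
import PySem

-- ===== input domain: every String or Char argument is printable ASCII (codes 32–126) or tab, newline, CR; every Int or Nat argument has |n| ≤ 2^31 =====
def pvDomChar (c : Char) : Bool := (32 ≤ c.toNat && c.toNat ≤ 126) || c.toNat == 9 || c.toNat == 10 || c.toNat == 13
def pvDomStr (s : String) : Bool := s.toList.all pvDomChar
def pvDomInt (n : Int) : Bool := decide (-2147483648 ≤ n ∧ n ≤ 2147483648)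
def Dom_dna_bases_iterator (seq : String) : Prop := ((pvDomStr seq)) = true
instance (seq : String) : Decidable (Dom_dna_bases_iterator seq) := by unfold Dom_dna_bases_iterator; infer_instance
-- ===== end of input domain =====

-- B replaces A's single if/elif counting loop by four independent str.count scans (idiomatic; same cost).

-- ===== PORT A =====
-- the loop's state: the four counters (a, t, c, g), updated by the if/elif chain
def dna_bases_iterator (seq : String) : Int × Int × Int × Int × Int :=
  let seq := PySem.Str.upper seq
  let length : Int := PySem.Str.len seq
  let st : Int × Int × Int × Int :=
    seq.toList.foldl (fun (st : Int × Int × Int × Int) base =>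
      let (a, t, c, g) := st
      if base = 'A' then (a + 1, t, c, g)
      else if base = 'T' then (a, t + 1, c, g)
      else if base = 'C' then (a, t, c + 1, g)
      else if base = 'G' then (a, t, c, g + 1)
      else (a, t, c, g)) (0, 0, 0, 0)
  (length, st.1, st.2.1, st.2.2.2, st.2.2.1)

-- ===== PORT B =====
def dna_bases_iterator_alt (seq : String) : Int × Int × Int × Int × Int :=
  let seq := PySem.Str.upper seq
  (PySem.Str.len seq, PySem.Str.count seq "A", PySem.Str.count seq "T",
   PySem.Str.count seq "G", PySem.Str.count seq "C")

-- ===== PRECONDITION & SPEC =====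
def Spec_dna_bases_iterator (seq : String) (out : Int × Int × Int × Int × Int) : Prop := out = dna_bases_iterator_alt seq
instance (seq : String) (out : Int × Int × Int × Int × Int) : Decidable (Spec_dna_bases_iterator seq out) := by unfold Spec_dna_bases_iterator; infer_instance

-- ===== CLAIM (what is proved, stated in full; the proofs are below) =====
def Claim_equal_dna_bases_iterator : Prop := ∀ (seq : String), Dom_dna_bases_iterator seq → Spec_dna_bases_iterator seq (dna_bases_iterator seq)

-- ===== LEMMAS AND PROOFS =====

-- Python's s.count(sub) for a single-character sub is the character count
theorem chars_count_go_single (c : Char) : ∀ (s : List Char) (fuel acc : Nat),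
    s.length ≤ fuel → PySem.Chars.count.go [c] fuel s acc = acc + s.count c := by
  intro s
  induction s with
  | nil =>
      intro fuel acc _
      cases fuel <;> simp [PySem.Chars.count.go, List.count_nil]
  | cons h t ih =>
      intro fuel acc hle
      cases fuel with
      | zero => simp at hle
      | succ n =>
          simp only [List.length_cons, Nat.succ_le_succ_iff] at hle
          by_cases hc : c = h
          · subst hc
            simp [PySem.Chars.count.go, List.isPrefixOf, ih n (acc + 1) hle]
            omega
          · have hpf : ([c].isPrefixOf (h :: t)) = false := by
              simp [List.isPrefixOf]; exact hc
            have hne : ¬h = c := fun e => hc e.symm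
            simp [PySem.Chars.count.go, hpf, ih n acc hle, hne]

theorem chars_count_single (c : Char) (s : List Char) :
    PySem.Chars.count s [c] = s.count c := by
  simp [PySem.Chars.count, chars_count_go_single c s s.length 0 le_rfl]

-- A's loop computes the four character counts
theorem loop_counts (l : List Char) : ∀ (a t c g : Int),
    l.foldl (fun (st : Int × Int × Int × Int) base =>
      let (a, t, c, g) := st
      if base = 'A' then (a + 1, t, c, g)
      else if base = 'T' then (a, t + 1, c, g)
      else if base = 'C' then (a, t, c + 1, g)
      else if base = 'G' then (a, t, c, g + 1)
      else (a, t, c, g)) (a, t, c, g)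
    = (a + l.count 'A', t + l.count 'T', c + l.count 'C', g + l.count 'G') := by
  induction l with
  | nil => intro a t c g; simp
  | cons h tl ih =>
      intro a t c g
      by_cases hA : h = 'A'
      · simp [List.foldl_cons, hA, ih]
        all_goals omega
      · by_cases hT : h = 'T'
        · simp [List.foldl_cons, hT, ih]
          all_goals omega
        · by_cases hC : h = 'C'
          · simp [List.foldl_cons, hC, ih]
            all_goals omega
          · by_cases hG : h = 'G'
            · simp [List.foldl_cons, hG, ih]
              all_goals omega
            · simp [List.foldl_cons, hA, hT, hC, hG, ih]

-- ===== VERDICT (by name: the statement is the Claim_ definition above) =====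
theorem dna_bases_iterator_spec : Claim_equal_dna_bases_iterator := by
  intro seq _
  show _ = _
  unfold dna_bases_iterator dna_bases_iterator_alt
  simp only [PySem.Str.count_eq]
  rw [show ("A" : String).toList = ['A'] from rfl, show ("T" : String).toList = ['T'] from rfl,
      show ("G" : String).toList = ['G'] from rfl, show ("C" : String).toList = ['C'] from rfl]
  simp only [chars_count_single, loop_counts]
  simp
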